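-- pv_equiv track=rewrite | github.com/suisuiwudi/stanford-corenlp | my_test.py | iob_to_biluo
-- ===== SOURCE A (Python) =====
-- def _consume_os(tags):
--     ## reference: https://github.com/explosion/spaCy/blob/c7d53348d7c0474852dc5ebe5794f2816ef7eb01/spacy/gold.pyx
--     while tags and tags[0] == 'O':
--         yield tags.pop(0)
--
-- def _consume_ent(tags):
--     if not tags:
--         return []
--     tag = tags.pop(0)
--     target_in = 'I' + tag[1:]
--     target_last = 'L' + tag[1:]
--     length = 1
--     while tags and tags[0] in {target_in, target_last}:
--         length += 1
--         tags.pop(0)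
--     label = tag[2:]
--     if length == 1:
--         return ['U-' + label]
--     else:
--         start = 'B-' + label
--         end = 'L-' + label
--         middle = ['I-%s' % label for _ in range(1, length - 1)]
--         return [start] + middle + [end]
--
-- def iob_to_biluo(tags):
--     out = []
--     curr_label = None
--     tags = list(tags)
--     while tags:
--         out.extend(_consume_os(tags))
--         out.extend(_consume_ent(tags))
--     return out
-- ===== SOURCE B (Python) =====
-- def iob_to_biluo(tags):
--     tags = list(tags)
--     n = len(tags)
--     out = []
--     prev = None
--     for i, t in enumerate(tags):
--         nxt = tags[i + 1] if i + 1 < n else None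
--         if t == 'O':
--             out.append('O')
--         else:
--             cont_prev = (prev is not None and prev != 'O'
--                          and t in ('I' + prev[1:], 'L' + prev[1:]))
--             cont_next = (nxt is not None
--                          and nxt in ('I' + t[1:], 'L' + t[1:]))
--             if cont_prev:
--                 out.append(('I-' if cont_next else 'L-') + t[2:])
--             else:
--                 out.append(('B-' if cont_next else 'U-') + t[2:])
--         prev = t
--     return out
-- ===== Notes on version B (the rewrite author's own statement) =====
-- stated objective: faster
-- what changed: Replaces the run-consuming generator pair that mutates the tag list with destructive pop(0) by a single non-mutating left-to-right pass that classifies each tag as O/U/B/I/L from its two neighbours (cont_prev/cont_next).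
import Mathlib
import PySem

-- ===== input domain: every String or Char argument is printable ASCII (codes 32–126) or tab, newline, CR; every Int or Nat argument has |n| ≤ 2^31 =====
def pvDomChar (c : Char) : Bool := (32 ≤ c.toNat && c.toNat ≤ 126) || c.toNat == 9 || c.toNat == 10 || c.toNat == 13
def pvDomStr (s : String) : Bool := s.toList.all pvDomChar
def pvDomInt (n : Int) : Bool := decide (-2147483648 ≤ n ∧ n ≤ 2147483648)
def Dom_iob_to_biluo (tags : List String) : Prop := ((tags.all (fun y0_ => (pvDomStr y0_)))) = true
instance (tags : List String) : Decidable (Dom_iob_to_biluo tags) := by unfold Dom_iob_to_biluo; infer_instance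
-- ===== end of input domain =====

-- B replaces A's run-consuming, list-mutating (pop(0)) generators by one non-mutating
-- left-to-right pass classifying each tag from its two neighbours; objective: faster
-- (A's repeated pop(0) is quadratic, B is a single linear pass; A mutates only its
-- local copy `tags = list(tags)`, so no caller-visible side effect is involved).

-- ===== PORT A =====
-- tag[1:] as code points (Python string slice, via PySem.Str.slice)
def pvTagRest (t : String) : List Char := (PySem.Str.slice t (some 1) none).toList
-- tag[2:] as code points
def pvTagLabel (t : String) : List Char := (PySem.Str.slice t (some 2) none).toList
-- 'I' + tag[1:]  /  'L' + tag[1:]  (string concatenation, built on code points)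
def pvMkI (s : List Char) : String := String.ofList ('I' :: s)
def pvMkL (s : List Char) : String := String.ofList ('L' :: s)

-- _consume_os: yields the popped leading 'O' tags; returns (yielded, remaining)
def pvConsumeOs : List String → List String × List String
  | [] => ([], [])
  | t :: rest =>
    if t = "O" then
      let p := pvConsumeOs rest
      (t :: p.1, p.2)
    else ([], t :: rest)

-- the 'while tags and tags[0] in {target_in, target_last}' loop of _consume_ent:
-- returns (number of extra tags consumed, remaining)
def pvEntWhile (targetIn targetLast : String) : List String → Nat × List String
  | [] => (0, [])
  | t :: rest =>
    if t = targetIn ∨ t = targetLast then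
      let p := pvEntWhile targetIn targetLast rest
      (p.1 + 1, p.2)
    else (0, t :: rest)

-- _consume_ent: returns (produced BILUO tags, remaining)
def pvConsumeEnt : List String → List String × List String
  | [] => ([], [])
  | tag :: rest =>
    let targetIn := pvMkI (pvTagRest tag)
    let targetLast := pvMkL (pvTagRest tag)
    let p := pvEntWhile targetIn targetLast rest
    let length := 1 + p.1
    let label := pvTagLabel tag
    if length = 1 then ([String.ofList ('U' :: '-' :: label)], p.2)
    else ([String.ofList ('B' :: '-' :: label)]
          ++ List.replicate (length - 2) (String.ofList ('I' :: '-' :: label))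
          ++ [String.ofList ('L' :: '-' :: label)], p.2)

-- length facts the main loop's termination cites
theorem pvEntWhile_len (ti tl : String) (l : List String) :
    (pvEntWhile ti tl l).2.length ≤ l.length := by
  induction l with
  | nil => simp [pvEntWhile]
  | cons t rest ih =>
    simp only [pvEntWhile]
    split
    · simpa using Nat.le_succ_of_le ih
    · simp

theorem pvConsumeEnt_len_lt (l : List String) (h : l ≠ []) :
    (pvConsumeEnt l).2.length < l.length := by
  cases l with
  | nil => exact absurd rfl h
  | cons tag rest =>
    simp only [pvConsumeEnt]
    split <;> simpa using Nat.lt_succ_of_le (pvEntWhile_len _ _ rest)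

theorem pvConsumeOs_len (l : List String) : (pvConsumeOs l).2.length ≤ l.length := by
  induction l with
  | nil => simp [pvConsumeOs]
  | cons t rest ih =>
    simp only [pvConsumeOs]
    split
    · simpa using Nat.le_succ_of_le ih
    · simp

-- 'while tags: out.extend(_consume_os(tags)); out.extend(_consume_ent(tags))'
def pvMainLoop (out : List String) (tags : List String) : List String :=
  match tags with
  | [] => out
  | t :: ts =>
    let p1 := pvConsumeOs (t :: ts)
    let p2 := pvConsumeEnt p1.2
    pvMainLoop (out ++ p1.1 ++ p2.1) p2.2
termination_by tags.length
decreasing_by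
  show (pvConsumeEnt (pvConsumeOs (t :: ts)).2).2.length < (t :: ts).length
  by_cases h : (pvConsumeOs (t :: ts)).2 = []
  · rw [h]; simp [pvConsumeEnt]
  · exact Nat.lt_of_lt_of_le (pvConsumeEnt_len_lt _ h) (pvConsumeOs_len (t :: ts))

def iob_to_biluo (tags : List String) : List String := pvMainLoop [] tags

-- ===== PORT B =====
-- cont_prev: prev is not None and prev != 'O' and t in ('I'+prev[1:], 'L'+prev[1:])
def pvContPrev (prev? : Option String) (t : String) : Bool :=
  match prev? with
  | none => false
  | some p => decide (p ≠ "O") &&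
      (decide (t = pvMkI (pvTagRest p)) || decide (t = pvMkL (pvTagRest p)))

-- cont_next: nxt is not None and nxt in ('I'+t[1:], 'L'+t[1:])
def pvContNext (next? : Option String) (t : String) : Bool :=
  match next? with
  | none => false
  | some nx => decide (nx = pvMkI (pvTagRest t)) || decide (nx = pvMkL (pvTagRest t))

-- the loop body: classify one tag from its neighbours
def pvClassify (prev? : Option String) (t : String) (next? : Option String) : String :=
  if t = "O" then "O"
  else
    let label := pvTagLabel t
    if pvContPrev prev? t then
      if pvContNext next? t then String.ofList ('I' :: '-' :: label)
      else String.ofList ('L' :: '-' :: label)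
    else
      if pvContNext next? t then String.ofList ('B' :: '-' :: label)
      else String.ofList ('U' :: '-' :: label)

-- the for-loop carrying prev; nxt is the head of the remaining tags
def pvAltLoop (prev? : Option String) : List String → List String
  | [] => []
  | t :: rest => pvClassify prev? t rest.head? :: pvAltLoop (some t) rest

def iob_to_biluo_alt (tags : List String) : List String := pvAltLoop none tags

-- ===== PRECONDITION & SPEC =====
def Spec_iob_to_biluo (tags : List String) (out : List String) : Prop := out = iob_to_biluo_alt tags
instance (tags : List String) (out : List String) : Decidable (Spec_iob_to_biluo tags out) := by unfold Spec_iob_to_biluo; infer_instance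

-- ===== CLAIM (what is proved, stated in full; the proofs are below) =====
def Claim_equal_iob_to_biluo : Prop := ∀ (tags : List String), Dom_iob_to_biluo tags → Spec_iob_to_biluo tags (iob_to_biluo tags)

-- ===== LEMMAS AND PROOFS =====

-- boundary invariant: the previous tag (if any) does not continue into the head of l
def pvBdry (prev? : Option String) (l : List String) : Prop :=
  ∀ t, l.head? = some t → pvContPrev prev? t = false

theorem pvTagRest_eq (t : String) : pvTagRest t = t.toList.drop 1 := by
  simp [pvTagRest, pysem]

theorem pvTagLabel_eq (t : String) : pvTagLabel t = t.toList.drop 2 := by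
  simp [pvTagLabel, pysem]

theorem pvTagRest_mkI (s : List Char) : pvTagRest (pvMkI s) = s := by
  simp [pvTagRest_eq, pvMkI]

theorem pvTagRest_mkL (s : List Char) : pvTagRest (pvMkL s) = s := by
  simp [pvTagRest_eq, pvMkL]

theorem pvTagLabel_mkI (s : List Char) : pvTagLabel (pvMkI s) = s.drop 1 := by
  simp [pvTagLabel_eq, pvMkI]

theorem pvTagLabel_mkL (s : List Char) : pvTagLabel (pvMkL s) = s.drop 1 := by
  simp [pvTagLabel_eq, pvMkL]

theorem pvTagLabel_eq_rest_drop (t : String) : pvTagLabel t = (pvTagRest t).drop 1 := by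
  simp [pvTagLabel_eq, pvTagRest_eq]

theorem pvMkI_ne_O (s : List Char) : pvMkI s ≠ "O" := by
  intro h
  have := congrArg String.toList h
  simp [pvMkI] at this

theorem pvMkL_ne_O (s : List Char) : pvMkL s ≠ "O" := by
  intro h
  have := congrArg String.toList h
  simp [pvMkL] at this

theorem pvClassify_O (p : Option String) (nx : Option String) :
    pvClassify p "O" nx = "O" := by simp [pvClassify]

theorem pvContPrev_someO (t : String) : pvContPrev (some "O") t = false := by
  simp [pvContPrev]

-- splitting B's pass along _consume_os
theorem pvOs_split (l : List String) (prev? : Option String) (hb : pvBdry prev? l) :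
    ∃ q, pvAltLoop prev? l = (pvConsumeOs l).1 ++ pvAltLoop q (pvConsumeOs l).2 ∧
      pvBdry q (pvConsumeOs l).2 ∧
      (∀ t, (pvConsumeOs l).2.head? = some t → t ≠ "O") := by
  induction l generalizing prev? with
  | nil =>
    exact ⟨prev?, by simp [pvConsumeOs, pvAltLoop],
      fun t ht => by simp [pvConsumeOs] at ht, fun t ht => by simp [pvConsumeOs] at ht⟩
  | cons t ts ih =>
    by_cases h : t = "O"
    · subst h
      have hb' : pvBdry (some "O") ts := fun x _ => pvContPrev_someO x
      obtain ⟨q, h1, h2, h3⟩ := ih (some "O") hb'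
      refine ⟨q, ?_, ?_, ?_⟩
      · simp only [pvConsumeOs, pvAltLoop, pvClassify_O]
        simpa using h1
      · simpa [pvConsumeOs] using h2
      · simpa [pvConsumeOs] using h3
    · refine ⟨prev?, by simp [pvConsumeOs, h], by simpa [pvConsumeOs, h] using hb, ?_⟩
      simp only [pvConsumeOs, if_neg h]
      intro x hx
      simp at hx
      exact hx ▸ h

-- characterisation of the inner while loop of _consume_ent
theorem pvEntWhile_spec (ti tl : String) (l : List String) :
    ∃ run, l = run ++ (pvEntWhile ti tl l).2 ∧ run.length = (pvEntWhile ti tl l).1 ∧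
      (∀ x ∈ run, x = ti ∨ x = tl) ∧
      (∀ t, (pvEntWhile ti tl l).2.head? = some t → t ≠ ti ∧ t ≠ tl) := by
  induction l with
  | nil => exact ⟨[], by simp [pvEntWhile], by simp [pvEntWhile], by simp, by simp [pvEntWhile]⟩
  | cons t rest ih =>
    by_cases h : t = ti ∨ t = tl
    · obtain ⟨run, h1, h2, h3, h4⟩ := ih
      refine ⟨t :: run, ?_, ?_, ?_, ?_⟩
      · simp [pvEntWhile, h]; exact h1
      · simp [pvEntWhile, h, h2]
      · intro x hx
        rcases List.mem_cons.mp hx with rfl | hx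
        · exact h
        · exact h3 x hx
      · simpa [pvEntWhile, h] using h4
    · refine ⟨[], by simp [pvEntWhile, h], by simp [pvEntWhile, h], by simp, ?_⟩
      simp only [pvEntWhile, if_neg h]
      intro x hx
      simp at hx
      subst hx
      exact not_or.mp h

-- B's pass over one entity run (everything after the first tag of the run)
theorem pvRun (run : List String) (r2 : List String) (s : List Char) :
    ∀ p : String, run ≠ [] →
    (∀ x ∈ run, x = pvMkI s ∨ x = pvMkL s) →
    (∀ t, r2.head? = some t → t ≠ pvMkI s ∧ t ≠ pvMkL s) →
    pvTagRest p = s → p ≠ "O" →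
    ∃ q, pvAltLoop (some p) (run ++ r2) =
        List.replicate (run.length - 1) (String.ofList ('I' :: '-' :: s.drop 1))
        ++ [String.ofList ('L' :: '-' :: s.drop 1)] ++ pvAltLoop q r2
      ∧ pvBdry q r2 := by
  induction run with
  | nil => intro p h; exact absurd rfl h
  | cons m rest ih =>
    intro p _ hmem hend hps hpO
    have hm : m = pvMkI s ∨ m = pvMkL s := hmem m (by simp)
    have hmr : pvTagRest m = s := by
      rcases hm with rfl | rfl
      · exact pvTagRest_mkI s
      · exact pvTagRest_mkL s
    have hmO : m ≠ "O" := by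
      rcases hm with rfl | rfl
      · exact pvMkI_ne_O s
      · exact pvMkL_ne_O s
    have hml : pvTagLabel m = s.drop 1 := by
      rcases hm with rfl | rfl
      · exact pvTagLabel_mkI s
      · exact pvTagLabel_mkL s
    have hcp : pvContPrev (some p) m = true := by
      simp only [pvContPrev, hps]
      rcases hm with rfl | rfl <;> simp [hpO]
    cases rest with
    | nil =>
      have hcn : pvContNext r2.head? m = false := by
        cases hr : r2.head? with
        | none => simp [pvContNext]
        | some x =>
          obtain ⟨hx1, hx2⟩ := hend x hr
          simp [pvContNext, hmr, hx1, hx2]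
      refine ⟨some m, ?_, ?_⟩
      · have step : pvAltLoop (some p) ([m] ++ r2) =
            pvClassify (some p) m r2.head? :: pvAltLoop (some m) r2 := rfl
        rw [step]
        simp [pvClassify, hmO, hcp, hcn, hml]
      · intro x hx
        obtain ⟨hx1, hx2⟩ := hend x hx
        simp [pvContPrev, hmr, hx1, hx2]
    | cons m' rest' =>
      have hm' : m' = pvMkI s ∨ m' = pvMkL s := hmem m' (by simp)
      obtain ⟨q, h1, h2⟩ := ih m (by simp) (fun x hx => hmem x (by simp [hx])) hend hmr hmO
      refine ⟨q, ?_, h2⟩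
      have step : pvAltLoop (some p) ((m :: m' :: rest') ++ r2) =
          pvClassify (some p) m (some m') :: pvAltLoop (some m) ((m' :: rest') ++ r2) := rfl
      have hcn : pvContNext (some m') m = true := by
        rcases hm' with rfl | rfl <;> simp [pvContNext, hmr]
      have hhead : pvClassify (some p) m (some m') =
          String.ofList ('I' :: '-' :: s.drop 1) := by
        simp [pvClassify, hmO, hcp, hcn, hml]
      rw [step, hhead, h1]
      simp [List.replicate_succ]

-- splitting B's pass along _consume_ent
theorem pvEnt_split (l : List String) (prev? : Option String) (hb : pvBdry prev? l)
    (hO : ∀ t, l.head? = some t → t ≠ "O") :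
    ∃ q, pvAltLoop prev? l = (pvConsumeEnt l).1 ++ pvAltLoop q (pvConsumeEnt l).2 ∧
      pvBdry q (pvConsumeEnt l).2 := by
  cases l with
  | nil =>
    exact ⟨prev?, by simp [pvConsumeEnt, pvAltLoop], fun t ht => by simp [pvConsumeEnt] at ht⟩
  | cons tag rest =>
    have htagO : tag ≠ "O" := hO tag rfl
    have hcp : pvContPrev prev? tag = false := hb tag rfl
    obtain ⟨run, h1, h2, h3, h4⟩ :=
      pvEntWhile_spec (pvMkI (pvTagRest tag)) (pvMkL (pvTagRest tag)) rest
    cases run with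
    | nil =>
      have hn : (pvEntWhile (pvMkI (pvTagRest tag)) (pvMkL (pvTagRest tag)) rest).1 = 0 := by
        simpa using h2.symm
      have hr : rest = (pvEntWhile (pvMkI (pvTagRest tag)) (pvMkL (pvTagRest tag)) rest).2 := by
        simpa using h1
      have hce : pvConsumeEnt (tag :: rest) =
          ([String.ofList ('U' :: '-' :: pvTagLabel tag)], rest) := by
        simp [pvConsumeEnt, hn, ← hr]
      have hcn : pvContNext rest.head? tag = false := by
        cases hh : rest.head? with
        | none => simp [pvContNext]
        | some x =>
          obtain ⟨hx1, hx2⟩ := h4 x (by rw [← hr]; exact hh)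
          simp [pvContNext, hx1, hx2]
      refine ⟨some tag, ?_, ?_⟩
      · rw [hce]
        have step : pvAltLoop prev? (tag :: rest) =
            pvClassify prev? tag rest.head? :: pvAltLoop (some tag) rest := rfl
        rw [step]
        simp [pvClassify, htagO, hcp, hcn]
      · rw [hce]
        intro x hx
        obtain ⟨hx1, hx2⟩ := h4 x (by rw [← hr]; exact hx)
        simp [pvContPrev, hx1, hx2]
    | cons m rest' =>
      have hk : (pvEntWhile (pvMkI (pvTagRest tag)) (pvMkL (pvTagRest tag)) rest).1 =
          rest'.length + 1 := by
        simpa using h2.symm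
      have hm : m = pvMkI (pvTagRest tag) ∨ m = pvMkL (pvTagRest tag) := h3 m (by simp)
      obtain ⟨q, hq1, hq2⟩ :=
        pvRun (m :: rest') (pvEntWhile (pvMkI (pvTagRest tag)) (pvMkL (pvTagRest tag)) rest).2
          (pvTagRest tag) tag (by simp) h3 h4 rfl htagO
      have hc : 1 + (pvEntWhile (pvMkI (pvTagRest tag)) (pvMkL (pvTagRest tag)) rest).1 - 2 =
          rest'.length := by omega
      have hce : pvConsumeEnt (tag :: rest) =
          (String.ofList ('B' :: '-' :: pvTagLabel tag) ::
            (List.replicate rest'.length (String.ofList ('I' :: '-' :: pvTagLabel tag)) ++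
              [String.ofList ('L' :: '-' :: pvTagLabel tag)]),
            (pvEntWhile (pvMkI (pvTagRest tag)) (pvMkL (pvTagRest tag)) rest).2) := by
        simp only [pvConsumeEnt]
        rw [if_neg (by omega), hc]
        simp
      have hcn : pvContNext rest.head? tag = true := by
        rw [h1]
        rcases hm with rfl | rfl <;> simp [pvContNext]
      refine ⟨q, ?_, by rw [hce]; exact hq2⟩
      rw [hce]
      have step : pvAltLoop prev? (tag :: rest) =
          pvClassify prev? tag rest.head? :: pvAltLoop (some tag) rest := rfl
      have hhead : pvClassify prev? tag rest.head? =
          String.ofList ('B' :: '-' :: pvTagLabel tag) := by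
        simp [pvClassify, htagO, hcp, hcn]
      rw [step, hhead]
      conv_lhs => rw [h1]
      rw [hq1, pvTagLabel_eq_rest_drop tag]
      simp

-- the main loop of A computes B's pass
theorem pvMain : ∀ n (l : List String), l.length ≤ n → ∀ (out : List String) (prev? : Option String),
    pvBdry prev? l → pvMainLoop out l = out ++ pvAltLoop prev? l := by
  intro n
  induction n with
  | zero =>
    intro l hl out prev? _
    have : l = [] := List.eq_nil_of_length_eq_zero (Nat.le_zero.mp hl)
    subst this
    simp [pvMainLoop, pvAltLoop]
  | succ n ih =>
    intro l hl out prev? hb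
    cases l with
    | nil => simp [pvMainLoop, pvAltLoop]
    | cons t ts =>
      obtain ⟨q1, ho1, ho2, ho3⟩ := pvOs_split (t :: ts) prev? hb
      obtain ⟨q2, he1, he2⟩ := pvEnt_split (pvConsumeOs (t :: ts)).2 q1 ho2 ho3
      have hlen : (pvConsumeEnt (pvConsumeOs (t :: ts)).2).2.length ≤ n := by
        by_cases h : (pvConsumeOs (t :: ts)).2 = []
        · simp [h, pvConsumeEnt]
        · have hlt := pvConsumeEnt_len_lt _ h
          have hle := pvConsumeOs_len (t :: ts)
          simp only [List.length_cons] at hle hl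
          omega
      have hrec := ih _ hlen
        (out ++ (pvConsumeOs (t :: ts)).1 ++ (pvConsumeEnt (pvConsumeOs (t :: ts)).2).1) q2 he2
      rw [pvMainLoop]
      rw [hrec, ho1, he1]
      simp

-- ===== VERDICT (by name: the statement is the Claim_ definition above) =====
theorem iob_to_biluo_spec : Claim_equal_iob_to_biluo := by
  intro tags _
  unfold Spec_iob_to_biluo iob_to_biluo iob_to_biluo_alt
  have := pvMain tags.length tags le_rfl [] none (fun t _ => rfl)
  simpa using this
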